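-- pv_equiv track=rewrite | github.com/eunhee-dev/problem-solving | 0x0b. recursion/17478번. 재귀함수가 뭔가요/solve.py | chat_recursive
-- ===== SOURCE A (Python) =====
-- def chat_recursive(n: int, depth: int) -> list[str]:
--     prefix = "____" * depth
--     chat_res = [prefix + "\"재귀함수가 뭔가요?\""]
--     if depth == n:
--         chat_res.append(prefix + "\"재귀함수는 자기 자신을 호출하는 함수라네\"")
--     else:
--         chat_res.append(prefix + "\"잘 들어보게. 옛날옛날 한 산 꼭대기에 이세상 모든 지식을 통달한 선인이 있었어.")
--         chat_res.append(prefix + "마을 사람들은 모두 그 선인에게 수많은 질문을 했고, 모두 지혜롭게 대답해 주었지.")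
--         chat_res.append(prefix + "그의 답은 대부분 옳았다고 하네. 그런데 어느 날, 그 선인에게 한 선비가 찾아와서 물었어.\"")
--         chat_res.extend(chat_recursive(n, depth+1))
--     chat_res.append(prefix + "라고 답변하였지.")
--     return chat_res
-- ===== SOURCE B (Python) =====
-- def chat_recursive(n: int, depth: int) -> list[str]:
--     lines: list[str] = []
--     for d in range(depth, n):
--         p = "____" * d
--         lines.append(p + "\"재귀함수가 뭔가요?\"")
--         lines.append(p + "\"잘 들어보게. 옛날옛날 한 산 꼭대기에 이세상 모든 지식을 통달한 선인이 있었어.")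
--         lines.append(p + "마을 사람들은 모두 그 선인에게 수많은 질문을 했고, 모두 지혜롭게 대답해 주었지.")
--         lines.append(p + "그의 답은 대부분 옳았다고 하네. 그런데 어느 날, 그 선인에게 한 선비가 찾아와서 물었어.\"")
--     p = "____" * n
--     lines.append(p + "\"재귀함수가 뭔가요?\"")
--     lines.append(p + "\"재귀함수는 자기 자신을 호출하는 함수라네\"")
--     closers = [("____" * d) + "라고 답변하였지." for d in range(depth, n + 1)]
--     return lines + closers[::-1]
-- ===== Notes on version B (the rewrite author's own statement) =====
-- stated objective: alternative
-- what changed: Replaces the nested recursion with two explicit iterations over the depth range: one forward loop emits the question/story blocks plus the base lines, and a reversed comprehension emits the closing answers.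
import Mathlib
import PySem

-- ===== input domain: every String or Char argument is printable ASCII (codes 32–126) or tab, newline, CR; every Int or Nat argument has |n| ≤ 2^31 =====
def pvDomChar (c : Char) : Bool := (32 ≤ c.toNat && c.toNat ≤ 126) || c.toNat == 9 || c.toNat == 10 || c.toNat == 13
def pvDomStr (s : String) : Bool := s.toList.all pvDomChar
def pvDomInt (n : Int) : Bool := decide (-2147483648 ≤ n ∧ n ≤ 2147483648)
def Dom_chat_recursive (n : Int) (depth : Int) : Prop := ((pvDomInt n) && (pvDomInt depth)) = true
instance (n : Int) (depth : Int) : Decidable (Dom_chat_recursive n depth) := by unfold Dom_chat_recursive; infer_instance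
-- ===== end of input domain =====

-- B replaces A's recursion by two explicit loops over the depth range (same lines, same order); equivalence is on depth ≤ n, where A terminates.

-- shared literal constants (the dialog lines) and Python's "____" * k
def pvRep (k : Int) : String := String.ofList (PySem.List.pyRepeat "____".toList k)
def pvQ : String := "\"재귀함수가 뭔가요?\""
def pvAns : String := "\"재귀함수는 자기 자신을 호출하는 함수라네\""
def pvL1 : String := "\"잘 들어보게. 옛날옛날 한 산 꼭대기에 이세상 모든 지식을 통달한 선인이 있었어."
def pvL2 : String := "마을 사람들은 모두 그 선인에게 수많은 질문을 했고, 모두 지혜롭게 대답해 주었지."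
def pvL3 : String := "그의 답은 대부분 옳았다고 하네. 그런데 어느 날, 그 선인에게 한 선비가 찾아와서 물었어.\""
def pvEnd : String := "라고 답변하였지."

-- ===== PORT A =====
-- A's recursion, fuel = remaining depth (fuel 0 with depth ≠ n is unreachable under Pre_)
def chatRecA (fuel : Nat) (n : Int) (depth : Int) : List String :=
  let pre := pvRep depth
  let rest :=
    if depth = n then [pre ++ pvAns]
    else
      match fuel with
      | 0 => []
      | f + 1 => [pre ++ pvL1, pre ++ pvL2, pre ++ pvL3] ++ chatRecA f n (depth + 1)
  ([pre ++ pvQ] ++ rest) ++ [pre ++ pvEnd]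

def chat_recursive (n : Int) (depth : Int) : List String :=
  chatRecA (n - depth).toNat n depth

-- ===== PORT B =====
def chat_recursive_alt (n : Int) (depth : Int) : List String :=
  let lines := (PySem.List.pyRange depth n 1).foldl (fun acc d =>
      let p := pvRep d
      acc ++ [p ++ pvQ, p ++ pvL1, p ++ pvL2, p ++ pvL3]) []
  let p := pvRep n
  let lines2 := lines ++ [p ++ pvQ, p ++ pvAns]
  let closers := (PySem.List.pyRange depth (n + 1) 1).map (fun d => pvRep d ++ pvEnd)
  lines2 ++ closers.reverse

-- ===== PRECONDITION & SPEC =====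
-- Pre_ excludes depth > n, where Python A recurses forever (RecursionError): A returns no value there.
def Pre_chat_recursive (n : Int) (depth : Int) : Prop := depth ≤ n
instance (n : Int) (depth : Int) : Decidable (Pre_chat_recursive n depth) := by unfold Pre_chat_recursive; infer_instance
def pvWitness_chat_recursive : Int × Int := (2, 0)

def Spec_chat_recursive (n : Int) (depth : Int) (out : List String) : Prop := out = chat_recursive_alt n depth
instance (n : Int) (depth : Int) (out : List String) : Decidable (Spec_chat_recursive n depth out) := by unfold Spec_chat_recursive; infer_instance

-- ===== CLAIM (what is proved, stated in full; the proofs are below) =====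
def Claim_equal_chat_recursive : Prop := ∀ (n : Int) (depth : Int), Dom_chat_recursive n depth → Pre_chat_recursive n depth → Spec_chat_recursive n depth (chat_recursive n depth)

-- ===== LEMMAS AND PROOFS =====

-- B's loops, written as flatMap / map over the ranges
lemma alt_eq (n depth : Int) :
    chat_recursive_alt n depth =
      ((PySem.List.pyRange depth n 1).flatMap (fun d =>
          [pvRep d ++ pvQ, pvRep d ++ pvL1, pvRep d ++ pvL2, pvRep d ++ pvL3]))
      ++ [pvRep n ++ pvQ, pvRep n ++ pvAns]
      ++ ((PySem.List.pyRange depth (n + 1) 1).map (fun d => pvRep d ++ pvEnd)).reverse := by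
  simp [chat_recursive_alt, ← List.flatMap_def]

lemma chatRecA_eq_alt : ∀ (k : Nat) (n depth : Int), depth + (k : Int) = n →
    chatRecA k n depth = chat_recursive_alt n depth := by
  intro k
  induction k with
  | zero =>
    intro n depth h
    have hdn : depth = n := by omega
    subst hdn
    simp [chatRecA, alt_eq, PySem.List.pyRange_one_eq_nil le_rfl,
      PySem.List.pyRange_one_singleton]
  | succ k ih =>
    intro n depth h
    have hlt : depth < n := by omega
    have hne : depth ≠ n := by omega
    have ih' := ih n (depth + 1) (by omega)
    rw [alt_eq] at ih' ⊢
    simp only [chatRecA, hne, if_false]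
    rw [PySem.List.pyRange_one_cons hlt, PySem.List.pyRange_one_cons (by omega : depth < n + 1)]
    simp only [List.flatMap_cons, List.map_cons, List.reverse_cons]
    rw [ih']
    simp

-- ===== VERDICT (by name: the statement is the Claim_ definition above) =====
theorem chat_recursive_spec : Claim_equal_chat_recursive := by
  intro n depth _ hpre
  unfold Spec_chat_recursive chat_recursive
  exact chatRecA_eq_alt _ n depth (by unfold Pre_chat_recursive at hpre; omega)
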